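-- pv_equiv track=rewrite | github.com/COMP3021-2024Spring-TA/COMP3021-2024Spring-PA1-Skeleton | resources/pythonxml/python_160.py | totalDigits
-- ===== SOURCE A (Python) =====
-- def totalDigits(x):
--     digits = 0
--     digit, cnt = 1, 9
--     while digit <= x:
--         digits += digit * cnt
--         digit += 1
--         cnt *= 10
--     return digits
-- ===== SOURCE B (Python) =====
-- def totalDigits(x):
--     if x <= 0:
--         return 0
--     return (10 ** x * (9 * x - 1) + 1) // 9
-- ===== Notes on version B (the rewrite author's own statement) =====
-- stated objective: simpler
-- what changed: Replaced the per-digit-length accumulation loop with the exact closed-form geometric sum (10^x*(9x-1)+1)//9 guarded by x<=0.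
import Mathlib
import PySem

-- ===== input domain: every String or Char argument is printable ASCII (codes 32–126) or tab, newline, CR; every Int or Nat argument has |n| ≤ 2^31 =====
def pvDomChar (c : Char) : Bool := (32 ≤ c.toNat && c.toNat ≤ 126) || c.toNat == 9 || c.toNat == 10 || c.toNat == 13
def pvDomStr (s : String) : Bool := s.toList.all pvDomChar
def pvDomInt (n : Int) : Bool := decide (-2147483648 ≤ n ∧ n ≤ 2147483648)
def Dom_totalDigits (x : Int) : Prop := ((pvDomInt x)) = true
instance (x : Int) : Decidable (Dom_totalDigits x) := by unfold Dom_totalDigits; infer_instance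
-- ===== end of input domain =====

-- B replaces A's accumulation loop by the exact closed-form (10^x*(9x-1)+1)//9; objective: simpler.

-- ===== PORT A =====
-- the while loop of A, state (digits, digit, cnt)
def totalDigitsLoop (x digits digit cnt : Int) : Int :=
  if digit ≤ x then
    totalDigitsLoop x (digits + digit * cnt) (digit + 1) (cnt * 10)
  else digits
termination_by (x + 1 - digit).toNat
decreasing_by omega

def totalDigits (x : Int) : Int := totalDigitsLoop x 0 1 9

-- ===== PORT B =====
def totalDigits_alt (x : Int) : Int :=
  if x ≤ 0 then 0
  else PySem.Int.floordiv (10 ^ x.toNat * (9 * x - 1) + 1) 9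

-- ===== PRECONDITION & SPEC =====
def Spec_totalDigits (x : Int) (out : Int) : Prop := out = totalDigits_alt x
instance (x : Int) (out : Int) : Decidable (Spec_totalDigits x out) := by unfold Spec_totalDigits; infer_instance

-- ===== CLAIM (what is proved, stated in full; the proofs are below) =====
def Claim_equal_totalDigits : Prop := ∀ (x : Int), Dom_totalDigits x → Spec_totalDigits x (totalDigits x)

-- ===== LEMMAS AND PROOFS =====

-- W n d = Σ_{i<n} (d+i)*10^i, the loop's remaining sum divided by the current cnt
def pvW : Nat → Int → Int
  | 0, _ => 0
  | n + 1, d => d + 10 * pvW n (d + 1)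

theorem pvLoop_eq (n : Nat) : ∀ (x digits digit cnt : Int),
    (x + 1 - digit).toNat = n →
    totalDigitsLoop x digits digit cnt = digits + cnt * pvW n digit := by
  induction n with
  | zero =>
    intro x digits digit cnt h
    rw [totalDigitsLoop]
    have : ¬ digit ≤ x := by omega
    simp [this, pvW]
  | succ n ih =>
    intro x digits digit cnt h
    have hle : digit ≤ x := by omega
    rw [totalDigitsLoop]
    simp only [hle, if_true]
    rw [ih x _ (digit + 1) (cnt * 10) (by omega)]
    simp only [pvW]
    ring

theorem pvW_closed (n : Nat) : ∀ d : Int,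
    81 * pvW n d = 9 * d * (10 ^ n - 1) + 10 - (n : Int) * 10 ^ n + ((n : Int) - 1) * 10 ^ (n + 1) := by
  induction n with
  | zero => intro d; simp [pvW]
  | succ n ih =>
    intro d
    have h := ih (d + 1)
    simp only [pvW]
    push_cast
    ring_nf
    ring_nf at h
    linarith

-- ===== VERDICT (by name: the statement is the Claim_ definition above) =====
theorem totalDigits_spec : Claim_equal_totalDigits := by
  intro x _
  unfold Spec_totalDigits totalDigits totalDigits_alt
  by_cases hx : x ≤ 0
  · rw [totalDigitsLoop]
    have : ¬ (1 : Int) ≤ x := by omega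
    simp [this, hx]
  · simp only [hx, if_false]
    set n := x.toNat with hn
    have hxn : (n : Int) = x := by omega
    rw [pvLoop_eq n x 0 1 9 (by omega)]
    have hW := pvW_closed n 1
    have h9 : 10 ^ n * (9 * x - 1) + 1 = 9 * (0 + 9 * pvW n 1) := by
      rw [← hxn]; linear_combination -hW
    rw [h9]
    rw [show PySem.Int.floordiv (9 * (0 + 9 * pvW n 1)) 9
        = (9 * (0 + 9 * pvW n 1)) / 9 from PySem.Int.floordiv_eq_ediv_of_pos (by norm_num)]
    omega
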